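-- pv_equiv track=rewrite | github.com/adityabalaji97/cricket-data-thing | services/nl2query.py | _sanitize_recommended_columns
-- ===== SOURCE A (Python) =====
-- from typing import Dict, Any, Optional, List
--
-- ALLOWED_RECOMMENDED_COLUMNS = {
--     "balls",
--     "balls_faced",
--     "runs",
--     "runs_conceded",
--     "strike_rate",
--     "average",
--     "wickets",
--     "dots",
--     "boundaries",
--     "fours",
--     "sixes",
--     "dot_percentage",
--     "boundary_percentage",
--     "economy",
--     "control_percentage",
--     "percent_balls",
--     "balls_per_dismissal",
--     "balls_per_wicket",
--     "overs",
--     "innings_count",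
-- }
--
-- def _sanitize_recommended_columns(raw_columns: Any, limit: int = 6) -> List[str]:
--     if not isinstance(raw_columns, list):
--         return []
--
--     columns: List[str] = []
--     seen = set()
--     for item in raw_columns:
--         column = str(item or "").strip().lower()
--         if not column or column not in ALLOWED_RECOMMENDED_COLUMNS:
--             continue
--         if column in seen:
--             continue
--         seen.add(column)
--         columns.append(column)
--         if len(columns) >= limit:
--             break
--     return columns
-- ===== SOURCE B (Python) =====
-- from typing import Any, List
--
-- ALLOWED_RECOMMENDED_COLUMNS = {
--     "balls", "balls_faced", "runs", "runs_conceded", "strike_rate", "average",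
--     "wickets", "dots", "boundaries", "fours", "sixes", "dot_percentage",
--     "boundary_percentage", "economy", "control_percentage", "percent_balls",
--     "balls_per_dismissal", "balls_per_wicket", "overs", "innings_count",
-- }
--
-- def _sanitize_recommended_columns(raw_columns: Any, limit: int = 6) -> List[str]:
--     if not isinstance(raw_columns, list):
--         return []
--     # invert the loop: normalize once, then for each column of the allowed
--     # vocabulary find its first occurrence; sort those positions and read back
--     norm = [str(item or "").strip().lower() for item in raw_columns]
--     hits = sorted(norm.index(c) for c in ALLOWED_RECOMMENDED_COLUMNS if c in norm)
--     return [norm[i] for i in hits[:max(0, limit)]]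
-- ===== Notes on version B (the rewrite author's own statement) =====
-- stated objective: alternative
-- what changed: Inverts the iteration: instead of A's single pass over the input with a seen-set, early continue and break, B normalizes the input once, looks up the first-occurrence position of each column of the allowed vocabulary, sorts those positions and reads the columns back, truncating with a slice.
-- intended difference: When limit <= 0 and the list contains at least one valid column, A's post-append break check still returns the first valid column as a one-element list, while B returns the empty list (its slice has non-positive length), which is the intended meaning of a non-positive limit. — e.g. on _sanitize_recommended_columns(["runs"], 0): A returns ["runs"], B returns []
import Mathlib
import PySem

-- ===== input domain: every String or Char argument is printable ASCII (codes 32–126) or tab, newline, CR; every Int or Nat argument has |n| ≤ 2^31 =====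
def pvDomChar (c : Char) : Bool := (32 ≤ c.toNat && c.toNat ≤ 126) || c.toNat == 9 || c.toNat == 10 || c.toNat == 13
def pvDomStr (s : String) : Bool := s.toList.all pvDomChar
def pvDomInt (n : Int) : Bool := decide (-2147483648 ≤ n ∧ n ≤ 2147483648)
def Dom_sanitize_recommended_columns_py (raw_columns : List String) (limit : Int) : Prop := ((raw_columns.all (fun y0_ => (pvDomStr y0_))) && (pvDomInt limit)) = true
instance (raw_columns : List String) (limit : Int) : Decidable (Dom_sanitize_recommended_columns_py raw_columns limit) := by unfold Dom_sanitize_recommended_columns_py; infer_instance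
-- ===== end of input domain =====

-- B inverts the loop: instead of A's single pass over the input with a seen-set and an early
-- break, B normalizes the input once, looks up the first-occurrence position of every column of
-- the allowed vocabulary, sorts those positions and reads the columns back; on limit ≤ 0 with a
-- valid column present B returns the empty slice where A still returns one element.

-- shared module constant ALLOWED_RECOMMENDED_COLUMNS (a Python set; B iterates it, so the
-- port fixes one order of its elements — the sorted() of positions makes the result independent of it)
def pvAllowed : List String :=
  ["balls", "balls_faced", "runs", "runs_conceded", "strike_rate", "average",
   "wickets", "dots", "boundaries", "fours", "sixes", "dot_percentage",
   "boundary_percentage", "economy", "control_percentage", "percent_balls",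
   "balls_per_dismissal", "balls_per_wicket", "overs", "innings_count"]

-- str(item or "").strip().lower() (item is a string; 'item or ""' is the falsy test on "")
def pvNorm (item : String) : String :=
  PySem.Str.lower (PySem.Str.strip (if item == "" then "" else item))

-- ===== PORT A =====
-- the for-loop of A: state (columns, seen), early 'continue's and 'break'
def pvLoopA (limit : Int) : List String → List String → PySem.Set String → List String
  | [], columns, _ => columns
  | item :: rest, columns, seen =>
      let column := pvNorm item
      if column == "" || !(pvAllowed.contains column) then
        pvLoopA limit rest columns seen
      else if PySem.Set.contains seen column then
        pvLoopA limit rest columns seen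
      else
        let seen' := PySem.Set.add seen column
        let columns' := columns ++ [column]
        if (columns'.length : Int) ≥ limit then columns'
        else pvLoopA limit rest columns' seen'

def sanitize_recommended_columns_py (raw_columns : List String) (limit : Int) : List String :=
  pvLoopA limit raw_columns [] PySem.Set.empty

-- ===== PORT B =====
-- norm = [str(item or "").strip().lower() for item in raw_columns]
-- hits = sorted(norm.index(c) for c in ALLOWED_RECOMMENDED_COLUMNS if c in norm)
-- return [norm[i] for i in hits[:max(0, limit)]]
def sanitize_recommended_columns_py_alt (raw_columns : List String) (limit : Int) : List String :=
  let norm := raw_columns.map pvNorm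
  let hits := PySem.List.sorted
      (pvAllowed.filterMap (fun c => (PySem.List.index? norm c).map Int.ofNat))
      (fun i => i) false
  (PySem.List.slice hits none (some (max 0 limit))).map (fun i => PySem.List.pyGetD norm i "")

-- ===== PRECONDITION & SPEC =====
-- On limit ≤ 0 with at least one valid column present, A's break check (run only after an append)
-- still returns one element, while B returns the empty list — the intended meaning of a non-positive limit.
def D_sanitize_recommended_columns_py (raw_columns : List String) (limit : Int) : Prop :=
  limit ≤ 0 ∧ ∃ item ∈ raw_columns, pvAllowed.contains (pvNorm item) = true
instance (raw_columns : List String) (limit : Int) : Decidable (D_sanitize_recommended_columns_py raw_columns limit) := by unfold D_sanitize_recommended_columns_py; infer_instance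

def Spec_sanitize_recommended_columns_py (raw_columns : List String) (limit : Int) (out : List String) : Prop := ¬ D_sanitize_recommended_columns_py raw_columns limit → out = sanitize_recommended_columns_py_alt raw_columns limit
instance (raw_columns : List String) (limit : Int) (out : List String) : Decidable (Spec_sanitize_recommended_columns_py raw_columns limit out) := by unfold Spec_sanitize_recommended_columns_py; infer_instance

def pvDiffWitness_sanitize_recommended_columns_py : List String × Int := (["runs"], 0)
def pvDiffWitnessOut_sanitize_recommended_columns_py : (List String) × (List String) := (["runs"], [])

-- ===== CLAIM (what is proved, stated in full; the proofs are below) =====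
def Claim_unchanged_sanitize_recommended_columns_py : Prop := ∀ (raw_columns : List String) (limit : Int), Dom_sanitize_recommended_columns_py raw_columns limit → Spec_sanitize_recommended_columns_py raw_columns limit (sanitize_recommended_columns_py raw_columns limit)
def Claim_changed_sanitize_recommended_columns_py : Prop := Dom_sanitize_recommended_columns_py (pvDiffWitness_sanitize_recommended_columns_py.1) (pvDiffWitness_sanitize_recommended_columns_py.2) ∧ D_sanitize_recommended_columns_py (pvDiffWitness_sanitize_recommended_columns_py.1) (pvDiffWitness_sanitize_recommended_columns_py.2) ∧ sanitize_recommended_columns_py (pvDiffWitness_sanitize_recommended_columns_py.1) (pvDiffWitness_sanitize_recommended_columns_py.2) = pvDiffWitnessOut_sanitize_recommended_columns_py.1 ∧ sanitize_recommended_columns_py_alt (pvDiffWitness_sanitize_recommended_columns_py.1) (pvDiffWitness_sanitize_recommended_columns_py.2) = pvDiffWitnessOut_sanitize_recommended_columns_py.2 ∧ pvDiffWitnessOut_sanitize_recommended_columns_py.1 ≠ pvDiffWitnessOut_sanitize_recommended_columns_py.2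
def Claim_exact_sanitize_recommended_columns_py : Prop := ∀ (raw_columns : List String) (limit : Int), Dom_sanitize_recommended_columns_py raw_columns limit → D_sanitize_recommended_columns_py raw_columns limit → sanitize_recommended_columns_py raw_columns limit ≠ sanitize_recommended_columns_py_alt raw_columns limit

-- ===== LEMMAS AND PROOFS =====

-- the normalized-and-filtered column stream both programs select from
def pvValid (raw : List String) : List String :=
  (raw.map pvNorm).filter (fun c => pvAllowed.contains c)

-- reference dedup-outside-seen (proof device relating both sides)
def pvDed (seen : PySem.Set String) : List String → List String
  | [] => []
  | c :: cs => if PySem.Set.contains seen c then pvDed seen cs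
               else c :: pvDed (PySem.Set.add seen c) cs

theorem pvFoldl_add_eq_ded (xs : List String) : ∀ (s : PySem.Set String),
    xs.foldl PySem.Set.add s = s ++ pvDed s xs := by
  induction xs with
  | nil => intro s; simp [pvDed]
  | cons x xs ih =>
    intro s
    rw [List.foldl_cons, ih (PySem.Set.add s x)]
    by_cases hx : x ∈ s
    · have h1 : PySem.Set.contains s x = true := by simpa using hx
      rw [PySem.Set.add_of_mem hx]
      simp [pvDed, hx]
    · rw [PySem.Set.add_of_not_mem hx]
      simp [pvDed, hx]

theorem pvDedup_eq_ded (xs : List String) :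
    PySem.List.dedup xs = pvDed PySem.Set.empty xs := by
  have h := pvFoldl_add_eq_ded xs PySem.Set.empty
  rw [PySem.List.dedup_eq_ofList, PySem.Set.ofList_eq_foldl]
  simpa [PySem.Set.empty] using h

theorem pvAllowed_no_empty : pvAllowed.contains "" = false := by decide

theorem pvAllowed_nodup : pvAllowed.Nodup := by decide

-- ---- A-side characterisation ----

theorem pvLoopA_eq (limit : Int) (hlim : 1 ≤ limit) (items : List String) :
    ∀ (cols : List String) (seen : PySem.Set String),
      (cols.length : Int) < limit →
      pvLoopA limit items cols seen
        = cols ++ (pvDed seen (pvValid items)).take (limit.toNat - cols.length) := by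
  induction items with
  | nil => intro cols seen _; simp [pvLoopA, pvValid, pvDed]
  | cons item rest ih =>
    intro cols seen hlt
    by_cases hv : pvAllowed.contains (pvNorm item) = true
    · have hne : (pvNorm item == "") = false := by
        by_cases h : pvNorm item = ""
        · rw [h] at hv; rw [pvAllowed_no_empty] at hv; exact absurd hv (by simp)
        · simp [h]
      have hcond : (pvNorm item == "" || !pvAllowed.contains (pvNorm item)) = false := by
        rw [hne, hv]; rfl
      have hvm : pvNorm item ∈ pvAllowed := by simpa using hv
      have hval : pvValid (item :: rest) = pvNorm item :: pvValid rest := by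
        simp [pvValid, hvm]
      by_cases hsm : pvNorm item ∈ seen
      · have hs : PySem.Set.contains seen (pvNorm item) = true := by simpa using hsm
        simp only [pvLoopA, hcond, hs, Bool.false_eq_true, if_false, if_true]
        rw [ih cols seen hlt, hval]
        simp [pvDed, hsm]
      · have hs : PySem.Set.contains seen (pvNorm item) = false := by simpa using hsm
        have hded : pvDed seen (pvNorm item :: pvValid rest)
            = pvNorm item :: pvDed (PySem.Set.add seen (pvNorm item)) (pvValid rest) := by
          simp [pvDed, hsm]
        have htk : limit.toNat - cols.length = (limit.toNat - (cols.length + 1)) + 1 := by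
          omega
        simp only [pvLoopA, hcond, hs, Bool.false_eq_true, if_false]
        by_cases hbrk : ((cols ++ [pvNorm item]).length : Int) ≥ limit
        · have hlen : cols.length + 1 = limit.toNat := by
            simp only [List.length_append, List.length_cons, List.length_nil] at hbrk
            push_cast at hbrk
            omega
          rw [if_pos hbrk, hval, hded, htk, List.take_succ_cons]
          have h0 : limit.toNat - (cols.length + 1) = 0 := by omega
          rw [h0, List.take_zero]
        · have hlt' : ((cols ++ [pvNorm item]).length : Int) < limit := by
            simp only [List.length_append, List.length_cons, List.length_nil] at hbrk ⊢
            push_cast at hbrk ⊢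
            omega
          rw [if_neg hbrk, ih (cols ++ [pvNorm item]) (PySem.Set.add seen (pvNorm item)) hlt',
              hval, hded, htk, List.take_succ_cons]
          simp
    · have hv' : pvAllowed.contains (pvNorm item) = false := by
        cases h : pvAllowed.contains (pvNorm item) with
        | false => rfl
        | true => exact absurd h hv
      have hcond : (pvNorm item == "" || !pvAllowed.contains (pvNorm item)) = true := by
        rw [hv']; simp
      have hvm' : pvNorm item ∉ pvAllowed := by simpa using hv'
      have hval : pvValid (item :: rest) = pvValid rest := by
        simp [pvValid, hvm']
      simp only [pvLoopA, hcond, if_true]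
      rw [ih cols seen hlt, hval]

theorem pvLoopA_all_invalid (limit : Int) (items : List String)
    (h : ∀ i ∈ items, pvAllowed.contains (pvNorm i) = false) :
    ∀ (cols : List String) (seen : PySem.Set String),
      pvLoopA limit items cols seen = cols := by
  induction items with
  | nil => intro cols seen; simp [pvLoopA]
  | cons item rest ih =>
    intro cols seen
    have hv := h item (by simp)
    have hcond : (pvNorm item == "" || !pvAllowed.contains (pvNorm item)) = true := by
      rw [hv]; simp
    simp only [pvLoopA, hcond, if_true]
    exact ih (fun i hi => h i (by simp [hi])) cols seen

-- A returns a non-empty list as soon as limit ≤ 0 and a valid item exists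
theorem pvLoopA_ne_nil (limit : Int) (hlim : limit ≤ 0) (items : List String) :
    (∃ i ∈ items, pvAllowed.contains (pvNorm i) = true) →
    pvLoopA limit items [] PySem.Set.empty ≠ [] := by
  induction items with
  | nil => rintro ⟨i, hi, _⟩; exact absurd hi (by simp)
  | cons item rest ih =>
    rintro ⟨i, hi, hvi⟩
    by_cases hv : pvAllowed.contains (pvNorm item) = true
    · have hne : (pvNorm item == "") = false := by
        by_cases h : pvNorm item = ""
        · rw [h] at hv; rw [pvAllowed_no_empty] at hv; exact absurd hv (by simp)
        · simp [h]
      have hcond : (pvNorm item == "" || !pvAllowed.contains (pvNorm item)) = false := by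
        rw [hne, hv]; rfl
      have hs : PySem.Set.contains PySem.Set.empty (pvNorm item) = false := by
        simp [PySem.Set.empty, PySem.Set.contains]
      have hbrk : ((([] : List String) ++ [pvNorm item]).length : Int) ≥ limit := by
        simp; omega
      simp only [pvLoopA, hcond, hs, Bool.false_eq_true, if_false, if_pos hbrk]
      simp
    · have hv' : pvAllowed.contains (pvNorm item) = false := by
        cases h : pvAllowed.contains (pvNorm item) with
        | false => rfl
        | true => exact absurd h hv
      have hcond : (pvNorm item == "" || !pvAllowed.contains (pvNorm item)) = true := by
        rw [hv']; simp
      simp only [pvLoopA, hcond, if_true]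
      apply ih
      rcases List.mem_cons.mp hi with h | h
      · rw [h] at hvi; rw [hvi] at hv'; exact absurd hv' (by simp)
      · exact ⟨i, h, hvi⟩

-- ---- B-side characterisation ----

theorem pvIndex?_of_mem (norm : List String) (c : String) (h : c ∈ norm) :
    PySem.List.index? norm c = some (norm.idxOf c) := by
  induction norm with
  | nil => exact absurd h (by simp)
  | cons x xs ih =>
    by_cases hx : x = c
    · subst hx
      rw [PySem.List.index?_cons_self, List.idxOf_cons_self]
    · have hc : c ∈ xs := by
        rcases List.mem_cons.mp h with h' | h'
        · exact absurd h'.symm hx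
        · exact h'
      rw [PySem.List.index?_cons_of_ne xs hx, ih hc, List.idxOf_cons_ne xs hx]
      rfl

theorem pvFilterMap_index_eq (l norm : List String) :
    l.filterMap (fun c => (PySem.List.index? norm c).map Int.ofNat)
      = (l.filter (fun c => decide (c ∈ norm))).map (fun c => ((norm.idxOf c : Nat) : Int)) := by
  induction l with
  | nil => simp
  | cons c l ih =>
    by_cases h : c ∈ norm
    · have hs' : List.idxOf? c norm = some (norm.idxOf c) := by
        simpa using pvIndex?_of_mem norm c h
      simpa [List.filterMap_cons, hs', h, Int.ofNat_eq_natCast] using ih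
    · have hn : PySem.List.index? norm c = none := by
        rw [PySem.List.index?_eq_none_iff]; exact h
      have hn' : List.idxOf? c norm = none := by simpa using hn
      simpa [List.filterMap_cons, hn', h] using ih

-- elements of pvDed seen (norm.filter p) are fresh p-elements of norm, listed in strictly
-- increasing order of their first occurrence in norm
theorem pvDed_mem_pairwise (p : String → Bool) : ∀ (nrm : List String) (seen : PySem.Set String),
    (∀ a ∈ pvDed seen (nrm.filter p), a ∉ seen ∧ a ∈ nrm ∧ p a = true) ∧
    (pvDed seen (nrm.filter p)).Pairwise (fun a b => nrm.idxOf a < nrm.idxOf b) := by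
  intro nrm
  induction nrm with
  | nil => intro seen; simp [pvDed]
  | cons x xs ih =>
    intro seen
    by_cases hp : p x = true
    · rw [List.filter_cons_of_pos hp]
      by_cases hx : x ∈ seen
      · have hs : PySem.Set.contains seen x = true := by simpa using hx
        rw [show pvDed seen (x :: xs.filter p) = pvDed seen (xs.filter p) by simp [pvDed, hx]]
        obtain ⟨hmem, hpw⟩ := ih seen
        refine ⟨fun a ha => ?_, ?_⟩
        · obtain ⟨h1, h2, h3⟩ := hmem a ha
          exact ⟨h1, by simp [h2], h3⟩
        · refine hpw.imp_of_mem ?_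
          intro a b ha hb hab
          have hax : a ≠ x := fun he => (hmem a ha).1 (he ▸ hx)
          have hbx : b ≠ x := fun he => (hmem b hb).1 (he ▸ hx)
          rw [List.idxOf_cons_ne xs (Ne.symm hax), List.idxOf_cons_ne xs (Ne.symm hbx)]
          omega
      · have hs : PySem.Set.contains seen x = false := by simpa using hx
        rw [show pvDed seen (x :: xs.filter p)
              = x :: pvDed (PySem.Set.add seen x) (xs.filter p) by simp [pvDed, hx]]
        obtain ⟨hmem, hpw⟩ := ih (PySem.Set.add seen x)
        constructor
        · intro a ha
          rcases List.mem_cons.mp ha with h | h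
          · subst h; exact ⟨hx, by simp, hp⟩
          · obtain ⟨h1, h2, h3⟩ := hmem a h
            have : a ∉ seen := fun hc => h1 (by simp [PySem.Set.mem_add, hc])
            exact ⟨this, by simp [h2], h3⟩
        · refine List.pairwise_cons.mpr ⟨?_, ?_⟩
          · intro b hb
            have hbx : b ≠ x := by
              intro he
              exact (hmem b hb).1 (by simp [he, PySem.Set.mem_add])
            rw [List.idxOf_cons_self, List.idxOf_cons_ne xs (Ne.symm hbx)]
            exact Nat.succ_pos _
          · refine (ih (PySem.Set.add seen x)).2.imp_of_mem ?_
            intro a b ha hb hab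
            have hax : a ≠ x := by
              intro he
              exact (hmem a ha).1 (by simp [he, PySem.Set.mem_add])
            have hbx : b ≠ x := by
              intro he
              exact (hmem b hb).1 (by simp [he, PySem.Set.mem_add])
            rw [List.idxOf_cons_ne xs (Ne.symm hax), List.idxOf_cons_ne xs (Ne.symm hbx)]
            omega
    · have hp' : p x = false := by
        cases h : p x with
        | false => rfl
        | true => exact absurd h hp
      rw [List.filter_cons_of_neg (by simp [hp'])]
      obtain ⟨hmem, hpw⟩ := ih seen
      refine ⟨fun a ha => ?_, ?_⟩
      · obtain ⟨h1, h2, h3⟩ := hmem a ha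
        exact ⟨h1, by simp [h2], h3⟩
      · refine hpw.imp_of_mem ?_
        intro a b ha hb hab
        have hax : a ≠ x := fun he => by
          have := (hmem a ha).2.2; rw [he, hp'] at this; exact absurd this (by simp)
        have hbx : b ≠ x := fun he => by
          have := (hmem b hb).2.2; rw [he, hp'] at this; exact absurd this (by simp)
        rw [List.idxOf_cons_ne xs (Ne.symm hax), List.idxOf_cons_ne xs (Ne.symm hbx)]
        omega

-- B computes take of the same deduplicated valid stream
theorem pvAlt_eq (raw : List String) (limit : Int) :
    sanitize_recommended_columns_py_alt raw limit
      = (pvDed PySem.Set.empty (pvValid raw)).take (max 0 limit).toNat := by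
  have hmax : (0 : Int) ≤ max 0 limit := le_max_left 0 limit
  simp only [sanitize_recommended_columns_py_alt]
  set nrm := raw.map pvNorm with hnrm
  set p : String → Bool := fun c => pvAllowed.contains c with hp
  set ref := pvDed PySem.Set.empty (nrm.filter p) with href
  obtain ⟨hmem, hpw⟩ := pvDed_mem_pairwise p nrm PySem.Set.empty
  have hrefval : pvValid raw = nrm.filter p := rfl
  -- ref as the dedup primitive, for membership both ways
  have hrefded : ref = PySem.List.dedup (nrm.filter p) := (pvDedup_eq_ded _).symm
  have hrefmem : ∀ a, a ∈ ref ↔ (a ∈ nrm ∧ p a = true) := by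
    intro a
    rw [hrefded]
    simp [List.mem_filter]
  have hrefnodup : ref.Nodup := by
    refine hpw.imp ?_
    intro a b hab he
    subst he; omega
  -- the unsorted hit list is the mapped filter of the vocabulary
  have h1 : pvAllowed.filterMap (fun c => (PySem.List.index? nrm c).map Int.ofNat)
      = (pvAllowed.filter (fun c => decide (c ∈ nrm))).map (fun c => ((nrm.idxOf c : Nat) : Int)) :=
    pvFilterMap_index_eq pvAllowed nrm
  -- the two underlying column lists are permutations
  have hperm : ref.Perm (pvAllowed.filter (fun c => decide (c ∈ nrm))) := by
    refine (List.perm_ext_iff_of_nodup hrefnodup (pvAllowed_nodup.filter _)).2 ?_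
    intro a
    rw [hrefmem a, List.mem_filter]
    simp [hp, and_comm]
  -- sorted hits = first-occurrence indices along ref
  have hsorted : PySem.List.sorted
        (pvAllowed.filterMap (fun c => (PySem.List.index? nrm c).map Int.ofNat))
        (fun i : Int => i) false
      = ref.map (fun c => ((nrm.idxOf c : Nat) : Int)) := by
    rw [h1]
    refine PySem.List.sorted_eq_of_perm_of_pairwise_lt _ _ _ ?_ ?_
    · exact hperm.map _
    · rw [List.pairwise_map]
      refine hpw.imp ?_
      intro a b hab
      exact_mod_cast hab
  -- reading the indices back yields ref itself
  have hread : ∀ c ∈ ref, PySem.List.pyGetD nrm ((nrm.idxOf c : Nat) : Int) "" = c := by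
    intro c hc
    have hcm : c ∈ nrm := (hrefmem c |>.1 hc).1
    have hlt : nrm.idxOf c < nrm.length := List.idxOf_lt_length_of_mem hcm
    rw [PySem.List.pyGetD_natCast]
    simp [List.getD_eq_getElem?_getD, List.getElem?_eq_getElem hlt]
  -- assemble
  rw [hsorted, PySem.List.slice_to _ hmax, ← List.map_take, List.map_map,
      show pvValid raw = nrm.filter p from rfl, ← href]
  calc ((ref.take (max 0 limit).toNat).map
          ((fun i => PySem.List.pyGetD nrm i "") ∘ fun c => ((nrm.idxOf c : Nat) : Int)))
      = (ref.take (max 0 limit).toNat).map id := by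
        refine List.map_congr_left ?_
        intro c hc
        exact hread c (List.mem_of_mem_take hc)
    _ = ref.take (max 0 limit).toNat := List.map_id _

theorem pvValid_nil_of_all_invalid (raw : List String)
    (h : ∀ i ∈ raw, pvAllowed.contains (pvNorm i) = false) : pvValid raw = [] := by
  simp only [pvValid, List.filter_eq_nil_iff]
  intro c hc
  obtain ⟨i, hi, rfl⟩ := List.mem_map.mp hc
  simpa using h i hi

-- ===== VERDICT (by name: the statement is the Claim_ definition above) =====
theorem sanitize_recommended_columns_py_spec : Claim_unchanged_sanitize_recommended_columns_py := by
  intro raw limit _ hD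
  by_cases hlim : 1 ≤ limit
  · have h := pvLoopA_eq limit hlim raw [] PySem.Set.empty (by simpa using hlim)
    show pvLoopA limit raw [] PySem.Set.empty = _
    rw [h, pvAlt_eq, max_eq_right (by omega : (0 : Int) ≤ limit)]
    simp
  · have hle : limit ≤ 0 := by omega
    unfold D_sanitize_recommended_columns_py at hD
    push Not at hD
    have hnone : ∀ i ∈ raw, pvAllowed.contains (pvNorm i) = false := by
      intro i hi
      cases h : pvAllowed.contains (pvNorm i) with
      | false => rfl
      | true => exact absurd h (hD hle i hi)
    show pvLoopA limit raw [] PySem.Set.empty = _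
    rw [pvLoopA_all_invalid limit raw hnone, pvAlt_eq, pvValid_nil_of_all_invalid raw hnone]
    simp [pvDed]

theorem sanitize_recommended_columns_py_changed : Claim_changed_sanitize_recommended_columns_py := by
  unfold Claim_changed_sanitize_recommended_columns_py; decide

theorem sanitize_recommended_columns_py_tight : Claim_exact_sanitize_recommended_columns_py := by
  intro raw limit _ hD
  obtain ⟨hlim, i, hi, hvi⟩ := hD
  rw [pvAlt_eq]
  have hmax : max 0 limit = 0 := by omega
  rw [hmax]
  simp only [Int.toNat_zero, List.take_zero]
  exact pvLoopA_ne_nil limit hlim raw ⟨i, hi, hvi⟩
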